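-- pv_equiv track=rewrite | github.com/adtimokhin/csmc-14200-checkers-final-project | src/bot.py | best_jump
-- ===== SOURCE A (Python) =====
-- def best_jump(valid_moves: list):
--     """
--     Out of all jump moves chooses the farthest jump-move (the one which takes the most pieces)
--     :param valid_moves: list of valid moves
--     :return: list of all jumps that capture maximum amount of pieces
--     """
--     best_moves = []
--     biggest_number_of_jumps = 0
--     for move in valid_moves:
--         if len(move[1]) == biggest_number_of_jumps:
--             best_moves.append(move)
--         elif len(move[1]) > biggest_number_of_jumps:
--             best_moves = [move]
--             biggest_number_of_jumps = len(move[1])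
--         else:
--             pass
--     return best_moves
-- ===== SOURCE B (Python) =====
-- def best_jump(valid_moves: list):
--     """Two-pass: compute the maximum capture count, then filter; matches A exactly."""
--     if not valid_moves:
--         return []
--     biggest = max(len(move[1]) for move in valid_moves)
--     return [move for move in valid_moves if len(move[1]) == biggest]
-- ===== Notes on version B (the rewrite author's own statement) =====
-- stated objective: simpler
-- what changed: Replaced the single-pass best-so-far accumulator (rebuilding the result list on each new maximum) with a two-pass max-then-filter: compute the biggest capture count, then keep the moves attaining it.
import Mathlib
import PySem

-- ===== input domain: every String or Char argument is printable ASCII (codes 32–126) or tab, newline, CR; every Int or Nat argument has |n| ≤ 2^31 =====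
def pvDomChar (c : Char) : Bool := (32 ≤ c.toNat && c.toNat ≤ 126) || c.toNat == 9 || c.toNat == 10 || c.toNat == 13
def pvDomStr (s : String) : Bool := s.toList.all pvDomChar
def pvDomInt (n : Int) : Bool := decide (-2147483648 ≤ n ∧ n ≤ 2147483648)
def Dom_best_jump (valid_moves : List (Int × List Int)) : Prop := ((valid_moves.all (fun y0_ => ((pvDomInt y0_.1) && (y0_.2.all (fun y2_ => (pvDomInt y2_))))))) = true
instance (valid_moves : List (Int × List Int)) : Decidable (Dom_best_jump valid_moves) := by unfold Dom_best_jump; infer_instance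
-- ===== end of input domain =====

-- B replaces A's single-pass best-so-far accumulator with a two-pass max-then-filter (simpler decomposition).


-- ===== PORT A =====
-- Literal port of A: one pass, keeping best_moves and biggest_number_of_jumps.
def best_jump (valid_moves : List (Int × List Int)) : List (Int × List Int) :=
  (valid_moves.foldl
    (fun (st : List (Int × List Int) × Int) move =>
      if (move.2.length : Int) = st.2 then (st.1 ++ [move], st.2)
      else if (move.2.length : Int) > st.2 then ([move], (move.2.length : Int))
      else st)
    ([], 0)).1

-- ===== PORT B =====
-- Literal port of B: guard empty list, compute the max capture count, then filter.
def best_jump_alt (valid_moves : List (Int × List Int)) : List (Int × List Int) :=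
  match valid_moves with
  | [] => []
  | m :: ms =>
    let biggest := ms.foldl (fun acc x => max acc ((x.2.length : Int))) ((m.2.length : Int))
    (m :: ms).filter (fun x => decide ((x.2.length : Int) = biggest))

-- ===== PRECONDITION & SPEC =====
def Spec_best_jump (valid_moves : List (Int × List Int)) (out : List (Int × List Int)) : Prop := out = best_jump_alt valid_moves
instance (valid_moves : List (Int × List Int)) (out : List (Int × List Int)) : Decidable (Spec_best_jump valid_moves out) := by unfold Spec_best_jump; infer_instance

-- ===== CLAIM (what is proved, stated in full; the proofs are below) =====
def Claim_equal_best_jump : Prop := ∀ (valid_moves : List (Int × List Int)), Dom_best_jump valid_moves → Spec_best_jump valid_moves (best_jump valid_moves)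

-- ===== LEMMAS AND PROOFS =====

def pvStep (st : List (Int × List Int) × Int) (move : Int × List Int) : List (Int × List Int) × Int :=
  if (move.2.length : Int) = st.2 then (st.1 ++ [move], st.2)
  else if (move.2.length : Int) > st.2 then ([move], (move.2.length : Int))
  else st

def pvMaxFold (k : Int) (xs : List (Int × List Int)) : Int :=
  xs.foldl (fun acc x => max acc ((x.2.length : Int))) k

theorem pvMaxFold_le (xs : List (Int × List Int)) (k : Int) : k ≤ pvMaxFold k xs := by
  induction xs generalizing k with
  | nil => simp [pvMaxFold]
  | cons x xs ih =>
    have := ih (max k ((x.2.length : Int)))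
    simp only [pvMaxFold, List.foldl_cons] at *
    exact le_trans (le_max_left _ _) this

theorem pvFold_char (xs : List (Int × List Int)) (bs : List (Int × List Int)) (k : Int) :
    xs.foldl pvStep (bs, k) =
      ((if pvMaxFold k xs = k then bs else []) ++
        xs.filter (fun x => decide ((x.2.length : Int) = pvMaxFold k xs)),
       pvMaxFold k xs) := by
  induction xs generalizing bs k with
  | nil => simp [pvMaxFold]
  | cons x xs ih =>
    simp only [List.foldl_cons]
    by_cases h1 : (x.2.length : Int) = k
    · have hstep : pvStep (bs, k) x = (bs ++ [x], k) := by simp [pvStep, h1]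
      rw [hstep, ih]
      have hM : pvMaxFold k (x :: xs) = pvMaxFold k xs := by
        simp [pvMaxFold, h1]
      rw [hM]
      by_cases h2 : pvMaxFold k xs = k
      · simp [h2, h1]
      · simp [h2, List.filter_cons]
        intro hc; exact h2 (hc ▸ h1 ▸ rfl)
    · by_cases h2 : (x.2.length : Int) > k
      · have hstep : pvStep (bs, k) x = ([x], (x.2.length : Int)) := by
          simp [pvStep, h1, h2]
        rw [hstep, ih]
        have hM : pvMaxFold k (x :: xs) = pvMaxFold ((x.2.length : Int)) xs := by
          simp [pvMaxFold, max_eq_right (le_of_lt h2)]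
        rw [hM]
        have hle : (x.2.length : Int) ≤ pvMaxFold ((x.2.length : Int)) xs :=
          pvMaxFold_le xs _
        have hne : pvMaxFold ((x.2.length : Int)) xs ≠ k := by
          intro hc; omega
        by_cases h3 : pvMaxFold ((x.2.length : Int)) xs = (x.2.length : Int)
        · simp [h3, h1]
        · simp [h3, hne, List.filter_cons]
          intro hc; exact h3 hc.symm
      · have hstep : pvStep (bs, k) x = (bs, k) := by
          simp [pvStep, h1, h2]
        rw [hstep, ih]
        have hM : pvMaxFold k (x :: xs) = pvMaxFold k xs := by
          have : max k ((x.2.length : Int)) = k := by omega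
          simp [pvMaxFold, this]
        rw [hM]
        have hlt : (x.2.length : Int) < k := by omega
        have hne : ¬ ((x.2.length : Int) = pvMaxFold k xs) := by
          have := pvMaxFold_le xs k; omega
        simp [hne]

-- ===== VERDICT (by name: the statement is the Claim_ definition above) =====
theorem best_jump_spec : Claim_equal_best_jump := by
  intro valid_moves _
  show best_jump valid_moves = best_jump_alt valid_moves
  cases valid_moves with
  | nil => rfl
  | cons m ms =>
    have hA : best_jump (m :: ms) = ((m :: ms).foldl pvStep ([], 0)).1 := rfl
    rw [hA, pvFold_char]
    have hnonneg : (0 : Int) ≤ (m.2.length : Int) := Int.natCast_nonneg _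
    have hM0 : pvMaxFold 0 (m :: ms) = pvMaxFold ((m.2.length : Int)) ms := by
      simp only [pvMaxFold, List.foldl_cons, max_eq_right hnonneg]
    have hle : (m.2.length : Int) ≤ pvMaxFold ((m.2.length : Int)) ms :=
      pvMaxFold_le ms _
    simp only [hM0]
    simp only [best_jump_alt, pvMaxFold, ite_self, List.nil_append]
    rfl
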